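-- pv_equiv track=rewrite | github.com/yLuffe/Mail2Nexx-Automation | data_processing/DataWriter.py | createFinalDict
-- ===== SOURCE A (Python) =====
-- def createFinalDict(emailData, txtData, mapping):
--     finalDictionaries = []
--
--     for dataDict in emailData:
--         finalDict = dict(mapping)
--
--         for key, value in dataDict.items():
--             if key in finalDict:
--                 finalDict[key] = value
--
--         for key, value in txtData.items():
--             if key in finalDict:
--                 finalDict[key] = value
--
--         finalDictionaries.append(finalDict)
--
--     return finalDictionaries
-- ===== SOURCE B (Python) =====
-- def createFinalDict(emailData, txtData, mapping):
--     return [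
--         {key: (txtData[key] if key in txtData else
--                (dataDict[key] if key in dataDict else default))
--          for key, default in mapping.items()}
--         for dataDict in emailData
--     ]
-- ===== Notes on version B (the rewrite author's own statement) =====
-- stated objective: simpler
-- what changed: B inverts the iteration: instead of materialising dict(mapping) and pushing overrides from dataDict and then txtData in two guarded loops, it pulls each value in a single comprehension over mapping (txtData first, then dataDict, else the template default).
import Mathlib
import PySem

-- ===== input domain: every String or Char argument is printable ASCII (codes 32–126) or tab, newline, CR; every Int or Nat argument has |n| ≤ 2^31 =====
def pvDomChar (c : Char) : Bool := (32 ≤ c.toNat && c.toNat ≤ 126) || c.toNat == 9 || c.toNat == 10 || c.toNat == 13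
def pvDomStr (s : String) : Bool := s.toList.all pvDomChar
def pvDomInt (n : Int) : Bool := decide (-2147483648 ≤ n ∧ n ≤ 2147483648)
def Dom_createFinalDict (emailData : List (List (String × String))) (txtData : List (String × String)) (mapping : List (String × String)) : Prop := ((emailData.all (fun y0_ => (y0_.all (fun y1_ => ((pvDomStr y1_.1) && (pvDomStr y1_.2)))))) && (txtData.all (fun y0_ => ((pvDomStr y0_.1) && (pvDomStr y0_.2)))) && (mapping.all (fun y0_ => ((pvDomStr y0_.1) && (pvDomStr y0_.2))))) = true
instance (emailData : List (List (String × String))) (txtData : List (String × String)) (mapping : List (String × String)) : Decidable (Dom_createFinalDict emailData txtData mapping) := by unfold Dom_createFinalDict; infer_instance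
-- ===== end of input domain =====

-- B builds each record by one template-driven comprehension over mapping (pull) instead of A's
-- dict(mapping) plus two guarded overlay loops (push); objective: simpler.


-- ===== PORT A =====
def createFinalDict (emailData : List (List (String × String))) (txtData : List (String × String)) (mapping : List (String × String)) : List (List (String × String)) :=
  emailData.foldl (fun finalDictionaries dataDict =>
    -- finalDict = dict(mapping); then the two guarded overlay loops
    -- (for key, value in dataDict.items() / txtData.items(): if key in finalDict: finalDict[key] = value)
    -- reassign finalDict in turn; the three statements are written composed here
    finalDictionaries ++
      [(txtData.foldl (fun d kv => if d.contains kv.1 then d.insert kv.1 kv.2 else d)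
          (dataDict.foldl (fun d kv => if d.contains kv.1 then d.insert kv.1 kv.2 else d)
            (mapping.foldl (fun d kv => d.insert kv.1 kv.2) PySem.Dict.empty))).items]) []

-- ===== PORT B =====
def createFinalDict_alt (emailData : List (List (String × String))) (txtData : List (String × String)) (mapping : List (String × String)) : List (List (String × String)) :=
  emailData.map (fun dataDict =>
    mapping.map (fun kv =>
      (kv.1,
        match (PySem.Dict.mk txtData).get? kv.1 with
        | some w => w
        | none =>
          match (PySem.Dict.mk dataDict).get? kv.1 with
          | some u => u
          | none => kv.2)))

-- ===== PRECONDITION & SPEC =====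
-- Pre_ excludes association lists with duplicate keys: they do not arise from Python dicts
-- (every parameter of A is a dict), and on them A's last-write-wins overlay and B's
-- first-match lookup are both accidental representations of the same dict input.
def Pre_createFinalDict (emailData : List (List (String × String))) (txtData : List (String × String)) (mapping : List (String × String)) : Prop :=
  (mapping.map Prod.fst).Nodup ∧ (txtData.map Prod.fst).Nodup ∧
    ∀ d ∈ emailData, (d.map Prod.fst).Nodup
instance (emailData : List (List (String × String))) (txtData : List (String × String)) (mapping : List (String × String)) : Decidable (Pre_createFinalDict emailData txtData mapping) := by unfold Pre_createFinalDict; infer_instance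

def pvWitness_createFinalDict : (List (List (String × String))) × (List (String × String)) × (List (String × String)) :=
  ([[("a", "1")], []], [("b", "2")], [("a", "0"), ("b", "3"), ("c", "x")])

def Spec_createFinalDict (emailData : List (List (String × String))) (txtData : List (String × String)) (mapping : List (String × String)) (out : List (List (String × String))) : Prop := out = createFinalDict_alt emailData txtData mapping
instance (emailData : List (List (String × String))) (txtData : List (String × String)) (mapping : List (String × String)) (out : List (List (String × String))) : Decidable (Spec_createFinalDict emailData txtData mapping out) := by unfold Spec_createFinalDict; infer_instance

-- ===== CLAIM (what is proved, stated in full; the proofs are below) =====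
def Claim_equal_createFinalDict : Prop := ∀ (emailData : List (List (String × String))) (txtData : List (String × String)) (mapping : List (String × String)), Dom_createFinalDict emailData txtData mapping → Pre_createFinalDict emailData txtData mapping → Spec_createFinalDict emailData txtData mapping (createFinalDict emailData txtData mapping)

-- ===== LEMMAS AND PROOFS =====

-- last-occurrence lookup: the value A's overlay loop would leave for a key
def rlookup (src : List (String × String)) (k : String) : Option String :=
  match src with
  | [] => none
  | kv :: t =>
    match rlookup t k with
    | some w => some w
    | none => if kv.1 = k then some kv.2 else none

theorem rlookup_eq_none_of_not_mem (src : List (String × String)) (k : String)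
    (h : k ∉ src.map Prod.fst) : rlookup src k = none := by
  induction src with
  | nil => rfl
  | cons kv t ih =>
    simp only [List.map_cons, List.mem_cons] at h
    rw [not_or] at h
    have hne : kv.1 ≠ k := fun e => h.1 (Eq.symm e)
    simp [rlookup, ih h.2, hne]

theorem rlookup_eq_get?_of_nodup (src : List (String × String)) (k : String)
    (h : (src.map Prod.fst).Nodup) : rlookup src k = (PySem.Dict.mk src).get? k := by
  induction src with
  | nil => rfl
  | cons kv t ih =>
    obtain ⟨a, b⟩ := kv
    simp only [List.map_cons, List.nodup_cons] at h
    simp only [rlookup, PySem.Dict.get?_mk_cons]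
    by_cases hk : a = k
    · subst hk
      rw [rlookup_eq_none_of_not_mem t a h.1]
      simp
    · rw [ih h.2]
      have hb : ¬ (a == k) = true := by simpa using hk
      cases hg : (PySem.Dict.mk t).get? k <;> simp [hk, hb]

-- A's guarded overlay loop updates every item's value pointwise by the last matching entry
theorem overlay_items (src : List (String × String)) (d : PySem.Dict String String) :
    (src.foldl (fun d kv => if d.contains kv.1 then d.insert kv.1 kv.2 else d) d).items
      = d.items.map (fun p => (p.1, (rlookup src p.1).getD p.2)) := by
  induction src generalizing d with
  | nil => simp [rlookup]
  | cons kv t ih =>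
    rw [List.foldl_cons]
    by_cases hc : d.contains kv.1 = true
    · rw [if_pos hc, ih, PySem.Dict.items_insert_of_contains _ _ hc, List.map_map]
      apply List.map_congr_left
      intro p _
      simp only [Function.comp]
      by_cases hp : p.1 = kv.1
      · simp only [hp, beq_self_eq_true, if_pos, rlookup]
        cases rlookup t kv.1 <;> simp
      · have : ¬ (p.1 == kv.1) = true := by simpa using hp
        simp only [this, if_neg, Bool.false_eq_true, not_false_iff, rlookup]
        cases hg : rlookup t p.1 with
        | some w => simp
        | none => simp [Ne.symm hp]
    · rw [if_neg hc, ih]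
      apply List.map_congr_left
      intro p hp
      have hpk : p.1 ∈ d.keys := by
        simp only [PySem.Dict.keys]; exact List.mem_map_of_mem hp
      have hne : p.1 ≠ kv.1 := by
        intro e
        rw [PySem.Dict.contains_eq_decide_mem_keys] at hc
        exact hc (by simpa [← e] using hpk)
      simp only [rlookup]
      cases hg : rlookup t p.1 with
      | some w => simp
      | none => simp [Ne.symm hne]

-- dict(mapping) for a duplicate-free mapping has exactly mapping as items
theorem dict_ofList_items (mapping : List (String × String))
    (h : (mapping.map Prod.fst).Nodup) :
    (mapping.foldl (fun d kv => d.insert kv.1 kv.2) PySem.Dict.empty).items = mapping := by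
  have := PySem.Dict.items_foldl_insert_fresh (l := mapping) (k := Prod.fst) (v := Prod.snd)
    (d := PySem.Dict.empty) (by intro a _; simp [PySem.Dict.contains_empty]) h
  simpa using this

-- appending-accumulator fold over emailData is a map
theorem foldl_append_map {α β : Type} (l : List α) (f : α → β) (acc : List β) :
    l.foldl (fun acc x => acc ++ [f x]) acc = acc ++ l.map f := by
  induction l generalizing acc with
  | nil => simp
  | cons x t ih => simp [ih, List.append_assoc]

theorem record_eq (txtData mapping dataDict : List (String × String))
    (hm : (mapping.map Prod.fst).Nodup) (ht : (txtData.map Prod.fst).Nodup)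
    (hd : (dataDict.map Prod.fst).Nodup) :
    (txtData.foldl (fun d kv => if d.contains kv.1 then d.insert kv.1 kv.2 else d)
      (dataDict.foldl (fun d kv => if d.contains kv.1 then d.insert kv.1 kv.2 else d)
        (mapping.foldl (fun d kv => d.insert kv.1 kv.2) PySem.Dict.empty))).items
    = mapping.map (fun kv =>
        (kv.1,
          match (PySem.Dict.mk txtData).get? kv.1 with
          | some w => w
          | none =>
            match (PySem.Dict.mk dataDict).get? kv.1 with
            | some u => u
            | none => kv.2)) := by
  rw [overlay_items, overlay_items, dict_ofList_items mapping hm, List.map_map]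
  apply List.map_congr_left
  intro kv _
  simp only [Function.comp]
  rw [← rlookup_eq_get?_of_nodup txtData kv.1 ht, ← rlookup_eq_get?_of_nodup dataDict kv.1 hd]
  cases rlookup txtData kv.1 <;> cases rlookup dataDict kv.1 <;> simp [Option.getD]

-- ===== VERDICT (by name: the statement is the Claim_ definition above) =====
theorem createFinalDict_spec : Claim_equal_createFinalDict := by
  intro emailData txtData mapping _ hpre
  obtain ⟨hm, ht, hd⟩ := hpre
  unfold Spec_createFinalDict createFinalDict createFinalDict_alt
  rw [foldl_append_map, List.nil_append]
  apply List.map_congr_left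
  intro dataDict hdm
  exact record_eq txtData mapping dataDict hm ht (hd dataDict hdm)
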